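-- pv_equiv track=rewrite | github.com/letsdank/python-kege | kp/23/45.py | F
-- ===== SOURCE A (Python) =====
-- def F(start, end):
--     if end < start:
--         return 0
--     if end == start:
--         return 1
--     k = F(start, end - 1) + F(start, end - 3)
--     if end % 2 == 0:
--         k += F(start, end // 2)
--     return k
-- ===== SOURCE B (Python) =====
-- def F(start, end):
--     if end < start:
--         return 0
--     n = end - start
--     f = [0] * (n + 1)
--     f[0] = 1
--     for i in range(1, n + 1):
--         e = start + i
--         k = f[i - 1] + (f[i - 3] if i >= 3 else 0)
--         if e % 2 == 0:
--             j = e // 2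
--             if j >= start:
--                 k += f[j - start]
--         f[i] = k
--     return f[n]
-- ===== Notes on version B (the rewrite author's own statement) =====
-- stated objective: alternative
-- what changed: replaces the branching (triple) recursion by a single bottom-up DP pass over the range [start, end], storing each subresult once in an array
import Mathlib
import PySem

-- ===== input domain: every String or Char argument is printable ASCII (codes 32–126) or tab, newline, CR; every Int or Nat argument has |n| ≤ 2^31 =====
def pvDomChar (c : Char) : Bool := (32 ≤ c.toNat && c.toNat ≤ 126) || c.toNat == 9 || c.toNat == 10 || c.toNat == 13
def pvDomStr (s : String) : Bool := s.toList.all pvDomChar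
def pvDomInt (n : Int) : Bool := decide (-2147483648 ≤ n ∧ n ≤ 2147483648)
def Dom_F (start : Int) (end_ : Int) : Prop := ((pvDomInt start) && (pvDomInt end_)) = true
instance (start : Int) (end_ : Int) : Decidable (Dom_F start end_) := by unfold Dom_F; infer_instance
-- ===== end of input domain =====

-- B replaces A's branching recursion by one bottom-up DP pass over [start, end] (objective: alternative algorithm).


-- ===== PORT A =====
-- A's recursion does not terminate on every Int input (see Pre_F), so it is ported with
-- explicit fuel; fuel (end_-start).toNat+1 suffices on Pre_F (proved below, Fgo_fuel).
def Fgo : Nat → Int → Int → Int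
  | 0, _, _ => 0
  | fuel + 1, start, end_ =>
    if end_ < start then 0
    else if end_ = start then 1
    else
      let k := Fgo fuel start (end_ - 1) + Fgo fuel start (end_ - 3)
      if PySem.Int.mod end_ 2 = 0 then k + Fgo fuel start (PySem.Int.floordiv end_ 2) else k

def F (start : Int) (end_ : Int) : Int := Fgo ((end_ - start).toNat + 1) start end_

-- ===== PORT B =====
-- one iteration of Source B's loop (loop variable i = idx+1 runs over range(1, n+1))
def Fstep (start : Int) (f : List Int) (idx : Nat) : List Int :=
  let i := idx + 1
  let e := start + (i : Int)
  let k := f.getD (i - 1) 0 + (if 3 ≤ i then f.getD (i - 3) 0 else 0)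
  let k := if PySem.Int.mod e 2 = 0 then
             (let j := PySem.Int.floordiv e 2
              if start ≤ j then k + f.getD (j - start).toNat 0 else k)
           else k
  f.set i k

def F_alt (start : Int) (end_ : Int) : Int :=
  if end_ < start then 0
  else
    let n := (end_ - start).toNat
    let init : List Int := (List.replicate (n + 1) 0).set 0 1
    let f := (List.range n).foldl (Fstep start) init
    f.getD n 0

-- ===== PRECONDITION & SPEC =====
-- Pre_F is exactly where the Python A returns: outside it (start < 0 < end_-start except
-- end_ = start+1 odd) A recurses forever (RecursionError), because for negative even end
-- the subcall end//2 moves upward and reaches the cycles 0→0 or -2→-1→-2.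
def Pre_F (start : Int) (end_ : Int) : Prop :=
  end_ ≤ start ∨ 0 ≤ start ∨ (end_ = start + 1 ∧ end_ % 2 ≠ 0)
instance (start : Int) (end_ : Int) : Decidable (Pre_F start end_) := by unfold Pre_F; infer_instance
def pvWitness_F : Int × Int := (0, 6)

def Spec_F (start : Int) (end_ : Int) (out : Int) : Prop := out = F_alt start end_
instance (start : Int) (end_ : Int) (out : Int) : Decidable (Spec_F start end_ out) := by unfold Spec_F; infer_instance

-- ===== CLAIM (what is proved, stated in full; the proofs are below) =====
def Claim_equal_F : Prop := ∀ (start : Int) (end_ : Int), Dom_F start end_ → Pre_F start end_ → Spec_F start end_ (F start end_)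

-- ===== LEMMAS AND PROOFS =====

theorem fd_two (e : Int) : PySem.Int.floordiv e 2 = e / 2 := by
  simp [PySem.Int.floordiv, Int.fdiv_eq_ediv]

theorem mod_two (e : Int) : PySem.Int.mod e 2 = e % 2 := by
  simp [PySem.Int.mod, Int.fmod_eq_emod]

-- one-step unfolding of A's recursion, with the even-branch written as an added if-term
theorem Fgo_succ (m : Nat) (start e : Int) (h1 : ¬ e < start) (h2 : e ≠ start) :
    Fgo (m + 1) start e = Fgo m start (e - 1) + Fgo m start (e - 3) +
      (if e % 2 = 0 then Fgo m start (e / 2) else 0) := by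
  simp only [Fgo, if_neg h1, if_neg h2, mod_two, fd_two]
  by_cases hev : e % 2 = 0
  · simp [hev]
  · simp [hev]

-- fuel convergence: with enough fuel Fgo does not depend on the fuel, for 0 ≤ start
theorem Fgo_fuel (start : Int) (h0 : 0 ≤ start) :
    ∀ (n : Nat) (e : Int) (f1 f2 : Nat), (e - start).toNat = n → n < f1 → n < f2 →
      Fgo f1 start e = Fgo f2 start e := by
  intro n
  induction n using Nat.strong_induction_on with
  | _ n ih =>
    intro e f1 f2 hn h1 h2
    match f1, f2 with
    | m1 + 1, m2 + 1 =>
      by_cases hlt : e < start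
      · simp [Fgo, hlt]
      · by_cases heq : e = start
        · simp [Fgo, heq]
        · have hgt : start < e := lt_of_le_of_ne (not_lt.mp hlt) (Ne.symm heq)
          have r1 : Fgo m1 start (e - 1) = Fgo m2 start (e - 1) :=
            ih ((e - 1 - start).toNat) (by omega) (e - 1) m1 m2 rfl (by omega) (by omega)
          have r3 : Fgo m1 start (e - 3) = Fgo m2 start (e - 3) :=
            ih ((e - 3 - start).toNat) (by omega) (e - 3) m1 m2 rfl (by omega) (by omega)
          have rh : Fgo m1 start (e / 2) = Fgo m2 start (e / 2) :=
            ih ((e / 2 - start).toNat) (by omega) (e / 2) m1 m2 rfl (by omega) (by omega)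
          rw [Fgo_succ m1 start e hlt heq, Fgo_succ m2 start e hlt heq, r1, r3, rh]

theorem F_base_zero (start e : Int) (h : e < start) : F start e = 0 := by
  simp [F, Fgo, h]

theorem F_base_one (start : Int) : F start start = 1 := by
  simp [F, Fgo]

-- the recurrence A satisfies for 0 ≤ start < e (out-of-range subcalls return 0)
theorem F_rec (start e : Int) (h0 : 0 ≤ start) (h : start < e) :
    F start e = F start (e - 1) + F start (e - 3) +
      (if e % 2 = 0 then F start (e / 2) else 0) := by
  unfold F
  rw [Fgo_succ ((e - start).toNat) start e (by omega) (by omega)]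
  have r1 := Fgo_fuel start h0 ((e - 1 - start).toNat) (e - 1)
      ((e - start).toNat) ((e - 1 - start).toNat + 1) rfl (by omega) (by omega)
  have r3 := Fgo_fuel start h0 ((e - 3 - start).toNat) (e - 3)
      ((e - start).toNat) ((e - 3 - start).toNat + 1) rfl (by omega) (by omega)
  have rh := Fgo_fuel start h0 ((e / 2 - start).toNat) (e / 2)
      ((e - start).toNat) ((e / 2 - start).toNat + 1) rfl (by omega) (by omega)
  rw [r1, r3, rh]

-- DP invariant: after k loop steps the list holds F start (start+i) at i ≤ k and 0 beyond
def DPInv (start : Int) (n k : Nat) (a : List Int) : Prop :=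
  a.length = n + 1 ∧ ∀ i : Nat, i ≤ n → a.getD i 0 = if i ≤ k then F start (start + i) else 0

theorem dp_init (start : Int) (n : Nat) :
    DPInv start n 0 ((List.replicate (n + 1) 0).set 0 1) := by
  refine ⟨by simp, ?_⟩
  intro i hi
  rcases Nat.eq_zero_or_pos i with h | h
  · subst h
    have := F_base_one start
    simp [List.getD, this]
  · have hne : (0:Nat) ≠ i := by omega
    have h0 : ¬ i ≤ 0 := by omega
    simp [List.getD, h0, Nat.lt_succ_of_le hi]
    rw [List.getElem_set_ne (by omega)]
    simp

theorem dp_step (start : Int) (h0 : 0 ≤ start) (n k : Nat) (hk : k < n) (a : List Int)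
    (ha : DPInv start n k a) : DPInv start n (k + 1) (Fstep start a k) := by
  obtain ⟨hlen, hval⟩ := ha
  refine ⟨by simp [Fstep, hlen], ?_⟩
  intro i hi
  by_cases hik : i = k + 1
  · subst hik
    have hlt : k + 1 < a.length := by omega
    have hv : ∀ v : Int, (a.set (k + 1) v).getD (k + 1) 0 = v := by
      intro v; simp [List.getD, hlt]
    simp only [Fstep]
    rw [hv, if_pos (Nat.le_refl (k + 1))]
    have hcast : start + ((k + 1 : Nat) : Int) = start + (k : Int) + 1 := by push_cast; ring
    set e : Int := start + (k : Int) + 1 with he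
    have hpos : (1:Int) ≤ e := by omega
    rw [hcast, F_rec start e h0 (by omega)]
    have t1 : a.getD (k + 1 - 1) 0 = F start (e - 1) := by
      have := hval k (by omega)
      simp only [Nat.add_sub_cancel]
      rw [this, if_pos (le_refl k)]
      congr 1; omega
    have t3 : (if 3 ≤ k + 1 then a.getD (k + 1 - 3) 0 else 0) = F start (e - 3) := by
      by_cases h3 : 3 ≤ k + 1
      · rw [if_pos h3]
        have hk2 : k + 1 - 3 = k - 2 := by omega
        have := hval (k - 2) (by omega)
        rw [hk2, this, if_pos (by omega)]
        congr 1; push_cast [Nat.cast_sub (by omega : 2 ≤ k)]; ring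
      · rw [if_neg h3, F_base_zero start (e - 3) (by omega)]
    rw [t1, t3, mod_two, fd_two]
    by_cases hev : e % 2 = 0
    · rw [if_pos hev, if_pos hev]
      have hjlt : e / 2 < e := by omega
      by_cases hj : start ≤ e / 2
      · rw [if_pos hj]
        have hjk : (e / 2 - start).toNat ≤ k := by omega
        have := hval ((e / 2 - start).toNat) (by omega)
        rw [this, if_pos hjk]
        have : start + ((e / 2 - start).toNat : Int) = e / 2 := by omega
        rw [this]
      · rw [if_neg hj, F_base_zero start (e / 2) (by omega)]
        ring
    · rw [if_neg hev, if_neg hev]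
      ring
  · have hne : (k + 1 : Nat) ≠ i := fun h => hik h.symm
    have : (Fstep start a k).getD i 0 = a.getD i 0 := by
      simp [Fstep, List.getD, List.getElem?_set_ne hne]
    rw [this, hval i hi]
    by_cases h1 : i ≤ k
    · simp [h1, Nat.le_succ_of_le h1]
    · have h2 : ¬ i ≤ k + 1 := by omega
      simp [h1, h2]

theorem dp_loop (start : Int) (h0 : 0 ≤ start) (n : Nat) :
    ∀ k, k ≤ n → DPInv start n k ((List.range k).foldl (Fstep start)
      ((List.replicate (n + 1) 0).set 0 1)) := by
  intro k
  induction k with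
  | zero => intro _; exact dp_init start n
  | succ k ih =>
    intro hk
    rw [List.range_succ, List.foldl_append]
    exact dp_step start h0 n k (by omega) _ (ih (by omega))

-- ===== VERDICT (by name: the statement is the Claim_ definition above) =====
theorem F_spec : Claim_equal_F := by
  intro start end_ _ hpre
  show F start end_ = F_alt start end_
  unfold F_alt
  by_cases h1 : end_ < start
  · rw [if_pos h1, F_base_zero start end_ h1]
  · rw [if_neg h1]
    rcases hpre with h | h | ⟨heq, hodd⟩
    · -- end_ ≤ start and ¬ end_ < start: end_ = start
      have heq : end_ = start := by omega
      subst heq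
      have hn : (end_ - end_).toNat = 0 := by omega
      simp [List.getD, F_base_one]
    · -- 0 ≤ start: the DP invariant at k = n
      obtain ⟨_, hv⟩ := dp_loop start h ((end_ - start).toNat) ((end_ - start).toNat) le_rfl
      rw [hv ((end_ - start).toNat) le_rfl, if_pos le_rfl]
      congr 1; omega
    · -- end_ = start + 1, end_ odd: one loop iteration, both sides compute 1
      subst heq
      have hn : (start + 1 - start).toNat = 1 := by omega
      have hodd' : ¬ PySem.Int.mod (start + (1:Int)) 2 = 0 := by
        rw [mod_two]; exact hodd
      have hF : F start (start + 1) = 1 := by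
        unfold F
        rw [show (start + 1 - start).toNat + 1 = 1 + 1 from by omega]
        rw [Fgo_succ 1 start (start + 1) (by omega) (by omega)]
        rw [mod_two] at hodd'
        simp [Fgo, show ¬ (start + 1) % 2 = 0 from hodd',
          show start + 1 - 3 < start from by omega,
          show start + 1 - 1 = start from by ring]
      rw [hF, hn]
      simp [Fstep, List.getD, show ¬ (3:Nat) ≤ 1 from by omega]
      exact fun hd _ => absurd (Int.emod_eq_zero_of_dvd hd) hodd
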